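-- pv_equiv track=rewrite | github.com/seoyoung81/Algorythm | 프로그래머스/lv0/120869. 외계어 사전/외계어 사전.py | solution
-- ===== SOURCE A (Python) =====
-- def solution(spell, dic):
--     answer = 2
--     for word in dic:
--         cnt = 0
--         for alpha in spell:
--             if not alpha in word:
--                 pass
--             else:
--                cnt += 1
--         if cnt == len(spell):
--             answer = 1
--     return answer
-- ===== SOURCE B (Python) =====
-- def solution(spell, dic):
--     candidates = dic
--     for alpha in spell:
--         candidates = [w for w in candidates if alpha in w]
--         if not candidates:
--             return 2
--     return 1 if candidates else 2
-- ===== Notes on version B (the rewrite author's own statement) =====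
-- stated objective: alternative
-- what changed: Inverted the loop nesting: instead of counting matching spell entries per word, B iterates over spell entries progressively filtering a candidate word list, returning 2 as soon as it empties and 1 if any candidate survives.
import Mathlib
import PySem

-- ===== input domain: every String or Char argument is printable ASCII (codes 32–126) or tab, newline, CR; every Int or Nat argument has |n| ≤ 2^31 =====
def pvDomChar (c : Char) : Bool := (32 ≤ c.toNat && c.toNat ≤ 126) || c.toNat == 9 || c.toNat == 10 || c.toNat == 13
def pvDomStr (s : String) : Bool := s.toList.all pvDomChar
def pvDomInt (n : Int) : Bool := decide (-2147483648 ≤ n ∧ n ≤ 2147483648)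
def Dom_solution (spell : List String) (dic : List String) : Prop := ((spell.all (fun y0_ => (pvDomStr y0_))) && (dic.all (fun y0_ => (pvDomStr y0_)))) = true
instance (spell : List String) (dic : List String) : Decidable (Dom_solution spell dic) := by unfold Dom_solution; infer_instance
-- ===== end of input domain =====

-- B inverts the loop nesting: it filters a candidate word list per spell entry instead of
-- counting matching spell entries per word (alternative decomposition; same return value).

-- ===== PORT A =====
-- answer = 2; for word in dic: cnt = 0; for alpha in spell: if not alpha in word: pass
-- else: cnt += 1; if cnt == len(spell): answer = 1; return answer
def solution (spell : List String) (dic : List String) : Int :=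
  dic.foldl (fun answer word =>
    let cnt : Int := spell.foldl (fun cnt alpha =>
      if ¬ (PySem.Str.isIn alpha word = true) then cnt else cnt + 1) 0
    if cnt = (spell.length : Int) then 1 else answer) 2

-- ===== PORT B =====
-- candidates = dic; for alpha in spell: candidates = [w for w in candidates if alpha in w];
-- if not candidates: return 2; return 1 if candidates else 2
def solutionAltGo (candidates : List String) : List String → Int
  | [] => if candidates.isEmpty then 2 else 1
  | alpha :: rest =>
    let c := candidates.filter (fun w => PySem.Str.isIn alpha w)
    if c.isEmpty then 2 else solutionAltGo c rest

def solution_alt (spell : List String) (dic : List String) : Int :=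
  solutionAltGo dic spell

-- ===== PRECONDITION & SPEC =====
def Spec_solution (spell : List String) (dic : List String) (out : Int) : Prop := out = solution_alt spell dic
instance (spell : List String) (dic : List String) (out : Int) : Decidable (Spec_solution spell dic out) := by unfold Spec_solution; infer_instance

-- ===== CLAIM (what is proved, stated in full; the proofs are below) =====
def Claim_equal_solution : Prop := ∀ (spell : List String) (dic : List String), Dom_solution spell dic → Spec_solution spell dic (solution spell dic)

-- ===== LEMMAS AND PROOFS =====

-- A's inner loop computes the number of spell entries contained in word
lemma pv_cnt_eq_countP (w : String) (spell : List String) (c : Int) :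
    spell.foldl (fun cnt alpha =>
      if ¬ (PySem.Str.isIn alpha w = true) then cnt else cnt + 1) c
      = c + (spell.countP (fun a => PySem.Str.isIn a w) : Int) := by
  induction spell generalizing c with
  | nil => simp only [List.foldl, List.countP_nil, Nat.cast_zero, add_zero]
  | cons a rest ih =>
    simp only [List.foldl, List.countP_cons]
    by_cases h : PySem.Str.isIn a w = true
    · rw [if_neg (fun hf => hf h), ih]
      simp only [h, if_pos]
      push_cast; ring
    · rw [if_pos h, ih]
      simp only [h, Bool.false_eq_true, if_false]
      push_cast; ring

-- A's outer loop returns 1 iff some word of dic contains every spell entry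
lemma pv_outer (spell : List String) (dic : List String) (acc : Int) :
    dic.foldl (fun answer word =>
      let cnt : Int := spell.foldl (fun cnt alpha =>
        if ¬ (PySem.Str.isIn alpha word = true) then cnt else cnt + 1) 0
      if cnt = (spell.length : Int) then 1 else answer) acc
    = if dic.any (fun w => spell.all (fun a => PySem.Str.isIn a w)) then 1 else acc := by
  induction dic generalizing acc with
  | nil => simp only [List.foldl, List.any_nil, Bool.false_eq_true, if_false]
  | cons w rest ih =>
    simp only [List.foldl, List.any_cons]
    rw [ih]
    have hc : (spell.foldl (fun cnt alpha =>
        if ¬ (PySem.Str.isIn alpha w = true) then cnt else cnt + 1) (0 : Int))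
        = (spell.countP (fun a => PySem.Str.isIn a w) : Int) := by
      rw [pv_cnt_eq_countP]; ring
    have hiff : ((spell.countP (fun a => PySem.Str.isIn a w) : Int) = (spell.length : Int))
        ↔ spell.all (fun a => PySem.Str.isIn a w) = true := by
      rw [Int.ofNat_inj (m := spell.countP _) (n := spell.length)]
      rw [List.countP_eq_length, List.all_eq_true]
    have hin : (spell.foldl (fun cnt alpha =>
        if ¬ (PySem.Str.isIn alpha w = true) then cnt else cnt + 1) (0 : Int)
          = (spell.length : Int))
        ↔ spell.all (fun a => PySem.Str.isIn a w) = true := by rw [hc]; exact hiff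
    by_cases hr : rest.any (fun w => spell.all (fun a => PySem.Str.isIn a w)) = true
    · rw [if_pos hr, if_pos (by rw [hr, Bool.or_true])]
    · rw [if_neg hr]; simp only [Bool.eq_false_iff.mpr hr, Bool.or_false]
      by_cases h : spell.all (fun a => PySem.Str.isIn a w) = true
      · rw [if_pos (hin.mpr h), if_pos h]
      · rw [if_neg (fun he => h (hin.mp he)), if_neg h]

-- B's filtering recursion also returns 1 iff some candidate contains every spell entry
lemma pv_go (spell : List String) (candidates : List String) :
    solutionAltGo candidates spell
      = if candidates.any (fun w => spell.all (fun a => PySem.Str.isIn a w)) then 1 else 2 := by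
  induction spell generalizing candidates with
  | nil =>
    simp only [solutionAltGo, List.all_nil, List.any_eq_true]
    cases candidates with
    | nil => simp
    | cons w ws => simp
  | cons alpha rest ih =>
    simp only [solutionAltGo]
    rw [ih]
    have hfa : ((candidates.filter (fun w => PySem.Str.isIn alpha w)).any
        (fun w => rest.all (fun a => PySem.Str.isIn a w)))
        = candidates.any (fun w => PySem.Str.isIn alpha w && rest.all (fun a => PySem.Str.isIn a w)) := by
      simp [List.any_filter]
    by_cases he : (candidates.filter (fun w => PySem.Str.isIn alpha w)).isEmpty = true
    · rw [if_pos he]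
      have hnone : ∀ w ∈ candidates, PySem.Str.isIn alpha w = false := by
        intro w hw
        simpa using List.filter_eq_nil_iff.mp (List.isEmpty_iff.mp he) w hw
      have hany : candidates.any (fun w => PySem.Str.isIn alpha w && rest.all (fun a => PySem.Str.isIn a w)) = false := by
        rw [List.any_eq_false]
        intro w hw h
        rw [Bool.and_eq_true] at h
        have hf := h.1
        rw [hnone w hw] at hf
        exact Bool.false_ne_true hf
      simp only [List.all_cons, hany, Bool.false_eq_true, if_false]
    · rw [if_neg he, hfa]
      simp only [List.all_cons]
      rfl

-- ===== VERDICT (by name: the statement is the Claim_ definition above) =====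
theorem solution_spec : Claim_equal_solution := by
  intro spell dic _
  show solution spell dic = solution_alt spell dic
  rw [solution, solution_alt, pv_outer, pv_go]
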